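-- pv_equiv track=rewrite | github.com/NewLandTV/BaekjoonHub | 백준/Gold/1081. 합/합.py | f
-- ===== SOURCE A (Python) =====
-- dp = {}
--
-- def f(n):
--     if n < 0:
--         return 0
--     if n in dp:
--         return dp[n]
--     if n < 10:
--         s = n * (n + 1) >> 1
--         dp[n] = s
--
--         return s
--
--     x, digit, s = n, 0, 0
--
--     while x > 9:
--         x //= 10
--         digit += 1
--
--     for i in range(x):
--         s += 10 ** digit * i
--
--     p, q = f(10 ** digit - 1), n - 10 ** digit * x
--     s += f(q) + (p + q + 1) * x
--     dp[n] = s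
--
--     return s
-- ===== SOURCE B (Python) =====
-- def f(n):
--     # closed-form per-digit-position summation; no recursion, no memo table
--     if n < 0:
--         return 0
--     total = 0
--     p = 1
--     while p <= n:
--         higher = n // (p * 10)
--         cur = n // p % 10
--         lower = n % p
--         total += higher * 45 * p + cur * (cur - 1) // 2 * p + cur * (lower + 1)
--         p *= 10
--     return total
-- ===== Notes on version B (the rewrite author's own statement) =====
-- stated objective: alternative
-- what changed: Replaces the memoized recursive digit-DP (leading-digit block decomposition with two recursive calls) by a single non-recursive loop over digit positions using the closed-form count of each digit position's contribution; no memo table, no recursion.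
import Mathlib
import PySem

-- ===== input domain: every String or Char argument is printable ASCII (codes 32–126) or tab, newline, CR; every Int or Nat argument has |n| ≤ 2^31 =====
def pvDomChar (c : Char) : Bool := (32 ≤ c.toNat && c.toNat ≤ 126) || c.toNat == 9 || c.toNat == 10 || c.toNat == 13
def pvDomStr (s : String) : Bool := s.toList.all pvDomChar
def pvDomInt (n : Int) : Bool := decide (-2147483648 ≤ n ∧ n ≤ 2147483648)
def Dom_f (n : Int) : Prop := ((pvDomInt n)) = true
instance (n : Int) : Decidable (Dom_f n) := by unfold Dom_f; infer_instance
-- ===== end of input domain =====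

-- B replaces A's memoized recursive digit-DP by a non-recursive per-digit-position closed-form loop;
-- the return value is identical for every int n (the module-level memo dict only caches).

-- ===== PORT A =====
-- A's `while x > 9: x //= 10; digit += 1` loop, returning (final x, digit)
def leadA (x : Int) : Int × Int :=
  if 9 < x then
    let r := leadA (PySem.Int.floordiv x 10)
    (r.1, r.2 + 1)
  else (x, 0)
termination_by x.toNat
decreasing_by
  have h10 : PySem.Int.floordiv x 10 = x / 10 :=
    PySem.Int.floordiv_eq_ediv_of_pos (by norm_num)
  rw [h10]; omega

-- facts about leadA used by f's termination (proved before f so decreasing_by can cite it)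
theorem leadA_spec_aux (N : Nat) : ∀ x : Int, x.toNat ≤ N → 9 < x →
    1 ≤ (leadA x).1 ∧ (leadA x).1 ≤ 9 ∧ 0 ≤ (leadA x).2 ∧
    (10 : Int) ^ (leadA x).2.toNat ≤ x ∧ x < 10 ^ ((leadA x).2.toNat + 1) ∧
    (leadA x).1 = x / 10 ^ (leadA x).2.toNat := by
  induction N with
  | zero => intro x hxN h9; omega
  | succ N ih =>
    intro x hxN h9
    have hfd : PySem.Int.floordiv x 10 = x / 10 :=
      PySem.Int.floordiv_eq_ediv_of_pos (by norm_num)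
    have hle : leadA x = ((leadA (x / 10)).1, (leadA (x / 10)).2 + 1) := by
      rw [leadA, if_pos h9, hfd]
    by_cases h99 : x ≤ 99
    · have hsm : leadA (x / 10) = (x / 10, 0) := by
        rw [leadA, if_neg (by omega)]
      rw [hle, hsm]
      refine ⟨by omega, by omega, by norm_num, ?_, ?_, ?_⟩
      · norm_num; omega
      · norm_num; omega
      · norm_num
    · have h9' : (9 : Int) < x / 10 := by omega
      obtain ⟨i1, i2, i3, i4, i5, i6⟩ := ih (x / 10) (by omega) h9'
      rw [hle]
      have htn : ((leadA (x / 10)).2 + 1).toNat = (leadA (x / 10)).2.toNat + 1 := by omega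
      simp only [htn]
      refine ⟨i1, i2, by omega, ?_, ?_, ?_⟩
      · rw [pow_succ]; omega
      · rw [pow_succ, pow_succ]; omega
      · rw [i6, pow_succ, Int.mul_comm, ← Int.ediv_ediv_of_nonneg (by norm_num : (0:Int) ≤ 10)]

theorem leadA_spec (x : Int) (hx : 9 < x) :
    1 ≤ (leadA x).1 ∧ (leadA x).1 ≤ 9 ∧ 0 ≤ (leadA x).2 ∧
    (10 : Int) ^ (leadA x).2.toNat ≤ x ∧ x < 10 ^ ((leadA x).2.toNat + 1) ∧
    (leadA x).1 = x / 10 ^ (leadA x).2.toNat := by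
  exact leadA_spec_aux x.toNat x le_rfl hx

-- port of A; the memo dict `dp` is a pure cache (the value depends only on n) and is dropped;
-- `n*(n+1) >> 1` is `>>> 1`; `10 ** digit` is `10 ^ digit.toNat` (digit ≥ 0 by leadA_spec)
def f (n : Int) : Int :=
  if n < 0 then 0
  else if n < 10 then (n * (n + 1)) >>> (1 : Nat)
  else
    let xd := leadA n
    let x := xd.1
    let digit := xd.2
    let s := (PySem.List.pyRange 0 x 1).foldl (fun s i => s + 10 ^ digit.toNat * i) 0
    let p := f (10 ^ digit.toNat - 1)
    let q := n - 10 ^ digit.toNat * x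
    s + f q + (p + q + 1) * x
termination_by n.toNat
decreasing_by
  · obtain ⟨-, -, -, h4, h5, -⟩ := leadA_spec n (by omega)
    have : (1 : Int) ≤ 10 ^ (leadA n).2.toNat := one_le_pow₀ (by norm_num)
    omega
  · obtain ⟨-, -, -, h4, -, h6⟩ := leadA_spec n (by omega)
    have hdm := Int.mul_ediv_add_emod n (10 ^ (leadA n).2.toNat)
    have h6' : 10 ^ (leadA n).2.toNat * (leadA n).1
        = 10 ^ (leadA n).2.toNat * (n / 10 ^ (leadA n).2.toNat) := by rw [h6]
    have hpos : (0 : Int) < 10 ^ (leadA n).2.toNat := by positivity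
    omega

-- ===== PORT B =====
-- B's `while p <= n` loop; the guard `1 ≤ p` only makes the recursion total (p starts at 1 and grows)
def altLoop (n p total : Int) : Int :=
  if h : 1 ≤ p ∧ p ≤ n then
    let higher := PySem.Int.floordiv n (p * 10)
    let cur := PySem.Int.mod (PySem.Int.floordiv n p) 10
    let lower := PySem.Int.mod n p
    altLoop n (p * 10)
      (total + higher * 45 * p + PySem.Int.floordiv (cur * (cur - 1)) 2 * p + cur * (lower + 1))
  else total
termination_by (n + 1 - p).toNat
decreasing_by omega

def f_alt (n : Int) : Int :=
  if n < 0 then 0 else altLoop n 1 0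

-- ===== PRECONDITION & SPEC =====
def Spec_f (n : Int) (out : Int) : Prop := out = f_alt n
instance (n : Int) (out : Int) : Decidable (Spec_f n out) := by unfold Spec_f; infer_instance

-- ===== CLAIM (what is proved, stated in full; the proofs are below) =====
def Claim_equal_f : Prop := ∀ (n : Int), Dom_f n → Spec_f n (f n)

-- ===== LEMMAS AND PROOFS =====

-- digit sum of a natural number (the mathematical reference both ports are reduced to)
def dsN (m : Nat) : Nat :=
  if m = 0 then 0 else m % 10 + dsN (m / 10)
decreasing_by exact Nat.div_lt_self (Nat.pos_of_ne_zero (by assumption)) (by norm_num)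

-- G m = sum of digit sums of 0, 1, …, m-1
def GN (m : Nat) : Nat := ∑ k ∈ Finset.range m, dsN k

theorem dsN_zero : dsN 0 = 0 := by simp [dsN]

theorem dsN_eq (m : Nat) : dsN m = m % 10 + dsN (m / 10) := by
  by_cases h : m = 0
  · simp [h, dsN]
  · rw [dsN, if_neg h]

-- digit sums split across a leading digit block
theorem dsN_split (d i t : Nat) (hi : i ≤ 9) (ht : t < 10 ^ d) :
    dsN (i * 10 ^ d + t) = i + dsN t := by
  induction d generalizing t with
  | zero =>
    have ht0 : t = 0 := by omega
    subst ht0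
    simp only [pow_zero, mul_one, Nat.add_zero]
    rw [dsN_eq i, Nat.mod_eq_of_lt (by omega), Nat.div_eq_of_lt (by omega), dsN_zero]
  | succ d ih =>
    by_cases hz : i * 10 ^ (d + 1) + t = 0
    · have hi0 : i = 0 := by
        by_contra h
        have : 0 < i * 10 ^ (d + 1) :=
          Nat.mul_pos (Nat.pos_of_ne_zero h) (by positivity)
        omega
      have ht0 : t = 0 := by omega
      simp [hi0, ht0]
    · have h1 : (i * 10 ^ (d + 1) + t) % 10 = t % 10 := by
        have e : i * 10 ^ (d + 1) + t = t + i * 10 ^ d * 10 := by ring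
        rw [e, Nat.add_mul_mod_self_right]
      have h2 : (i * 10 ^ (d + 1) + t) / 10 = i * 10 ^ d + t / 10 := by
        have e : i * 10 ^ (d + 1) + t = t + 10 * (i * 10 ^ d) := by ring
        rw [e, Nat.add_mul_div_left _ _ (by norm_num)]; omega
      have h3 : t / 10 < 10 ^ d := Nat.div_lt_of_lt_mul (by rw [← pow_succ']; exact ht)
      rw [dsN_eq (i * 10 ^ (d + 1) + t), h1, h2, ih (t / 10) h3, dsN_eq t]
      omega

-- one block [i*10^d, i*10^d + s) of digit sums, leading digit i
theorem GN_Ico (d i s : Nat) (hi : i ≤ 9) (hs : s ≤ 10 ^ d) :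
    ∑ k ∈ Finset.Ico (i * 10 ^ d) (i * 10 ^ d + s), dsN k = i * s + GN s := by
  rw [Finset.sum_Ico_eq_sum_range]
  simp only [Nat.add_sub_cancel_left]
  rw [Finset.sum_congr rfl
    (fun k hk => dsN_split d i k hi (lt_of_lt_of_le (Finset.mem_range.mp hk) hs))]
  rw [Finset.sum_add_distrib, Finset.sum_const, Finset.card_range, GN, smul_eq_mul]
  ring

theorem GN_mul (d x : Nat) (hx : x ≤ 9) :
    GN (x * 10 ^ d) = 10 ^ d * (∑ i ∈ Finset.range x, i) + x * GN (10 ^ d) := by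
  induction x with
  | zero => simp [GN]
  | succ x ih =>
    have hx' : x ≤ 9 := by omega
    have e : (x + 1) * 10 ^ d = x * 10 ^ d + 10 ^ d := by ring
    have h1 : GN ((x + 1) * 10 ^ d)
        = GN (x * 10 ^ d) + ∑ k ∈ Finset.Ico (x * 10 ^ d) (x * 10 ^ d + 10 ^ d), dsN k := by
      rw [e, GN, GN, Finset.range_eq_Ico,
        ← Finset.sum_Ico_consecutive dsN (Nat.zero_le _) (Nat.le_add_right _ _)]
    rw [h1, ih hx', GN_Ico d x (10 ^ d) hx' le_rfl, Finset.sum_range_succ]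
    ring

-- the block decomposition of GN that A's recursion implements
theorem GN_block (d x s : Nat) (hx : x ≤ 9) (hs : s ≤ 10 ^ d) :
    GN (x * 10 ^ d + s) =
      10 ^ d * (∑ i ∈ Finset.range x, i) + x * GN (10 ^ d) + x * s + GN s := by
  have h1 : GN (x * 10 ^ d + s)
      = GN (x * 10 ^ d) + ∑ k ∈ Finset.Ico (x * 10 ^ d) (x * 10 ^ d + s), dsN k := by
    rw [GN, GN, Finset.range_eq_Ico,
      ← Finset.sum_Ico_consecutive dsN (Nat.zero_le _) (Nat.le_add_right _ _)]
  rw [h1, GN_mul d x hx, GN_Ico d x s hx hs]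
  ring

-- the per-position closed form B's loop adds at position p
theorem step_sum (p m : Nat) (hp : 0 < p) :
    ∑ k ∈ Finset.range (m + 1), (k / p % 10) =
      m / (10 * p) * 45 * p + (m / p % 10) * (m / p % 10 - 1) / 2 * p
        + (m / p % 10) * (m % p + 1) := by
  induction m with
  | zero =>
    simp [Nat.div_eq_of_lt hp, Nat.div_eq_of_lt (by omega : 0 < 10 * p)]
  | succ m ih =>
    rw [Finset.sum_range_succ, ih]
    have hdd : ∀ k : Nat, k / (10 * p) = k / p / 10 := fun k => by
      rw [Nat.div_div_eq_div_mul, Nat.mul_comm]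
    have h1 := Nat.div_add_mod m p
    have h2 : m % p < p := Nat.mod_lt m hp
    have h3 := Nat.div_add_mod (m / p) 10
    by_cases hc : m % p + 1 < p
    · -- no rollover at position p
      have e1 : (m + 1) / p = m / p := by
        conv_lhs => rw [← h1]
        rw [Nat.add_assoc, Nat.mul_add_div hp, Nat.div_eq_of_lt hc, Nat.add_zero]
      have e2 : (m + 1) % p = m % p + 1 := by
        conv_lhs => rw [← h1]
        rw [Nat.add_assoc, Nat.mul_add_mod, Nat.mod_eq_of_lt hc]
      rw [hdd (m + 1), hdd m, e1, e2]
      ring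
    · -- m+1 is a multiple of p
      have hr : m % p + 1 = p := by omega
      have e1 : (m + 1) / p = m / p + 1 := by
        have : m + 1 = p * (m / p + 1) := by
          conv_lhs => rw [← h1]
          ring_nf; omega
        rw [this, Nat.mul_div_cancel_left _ hp]
      have e2 : (m + 1) % p = 0 := by
        have : m + 1 = p * (m / p + 1) := by
          conv_lhs => rw [← h1]
          ring_nf; omega
        rw [this, Nat.mul_mod_right]
      rw [hdd (m + 1), hdd m, e1, e2]
      by_cases h9 : m / p % 10 < 9
      · have e3 : (m / p + 1) % 10 = m / p % 10 + 1 := by omega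
        have e4 : (m / p + 1) / 10 = m / p / 10 := by omega
        rw [e3, e4]
        have hcn : m / p % 10 < 10 := by omega
        set c := m / p % 10 with hcdef
        interval_cases c <;> omega
      · have h9' : m / p % 10 = 9 := by omega
        have e3 : (m / p + 1) % 10 = 0 := by omega
        have e4 : (m / p + 1) / 10 = m / p / 10 + 1 := by omega
        rw [e3, e4, h9']
        ring_nf
        omega

-- Python's `cur * (cur - 1) // 2` on a nonnegative cur, as a Nat computation
theorem halfc (c : Nat) :
    PySem.Int.floordiv ((c : Int) * ((c : Int) - 1)) 2 = ((c * (c - 1) / 2 : Nat) : Int) := by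
  cases c with
  | zero =>
    rw [show ((0 : Nat) : Int) * (((0 : Nat) : Int) - 1) = ((0 : Nat) : Int) by norm_num,
      show (2 : Int) = ((2 : Nat) : Int) by norm_num, PySem.Int.floordiv_natCast]
  | succ c =>
    rw [show ((c + 1 : Nat) : Int) * (((c + 1 : Nat) : Int) - 1) = (((c + 1) * c : Nat) : Int)
      by push_cast; ring, show (2 : Int) = ((2 : Nat) : Int) by norm_num, PySem.Int.floordiv_natCast]
    norm_num

theorem altLoop_eq_aux (N : Nat) : ∀ (m P : Nat) (t : Int), 1 ≤ P → m + 1 - P ≤ N →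
    altLoop (m : Int) (P : Int) t
      = t + ((∑ k ∈ Finset.range (m + 1), dsN (k / P) : Nat) : Int) := by
  induction N with
  | zero =>
    intro m P t hP hN
    rw [altLoop, dif_neg (by omega)]
    have hz : ∑ k ∈ Finset.range (m + 1), dsN (k / P) = 0 :=
      Finset.sum_eq_zero fun k hk => by
        rw [Nat.div_eq_of_lt (by have := Finset.mem_range.mp hk; omega), dsN_zero]
    rw [hz]; simp
  | succ N ih =>
    intro m P t hP hN
    by_cases hPm : P ≤ m
    · rw [altLoop, dif_pos (by omega)]
      dsimp only
      have c10 : (P : Int) * 10 = ((P * 10 : Nat) : Int) := by push_cast; ring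
      have cfd : PySem.Int.floordiv (m : Int) ((P : Int) * 10) = ((m / (P * 10) : Nat) : Int) := by
        rw [c10, PySem.Int.floordiv_natCast]
      have cmod : PySem.Int.mod (PySem.Int.floordiv (m : Int) (P : Int)) 10
          = ((m / P % 10 : Nat) : Int) := by
        rw [PySem.Int.floordiv_natCast, show (10 : Int) = ((10 : Nat) : Int) by norm_num,
          PySem.Int.mod_natCast]
      have cml : PySem.Int.mod (m : Int) (P : Int) = ((m % P : Nat) : Int) :=
        PySem.Int.mod_natCast m P
      rw [cfd, cmod, cml, halfc (m / P % 10), c10,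
        ih m (P * 10) _ (by omega) (by omega)]
      have hsplit : (∑ k ∈ Finset.range (m + 1), dsN (k / P))
          = (∑ k ∈ Finset.range (m + 1), (k / P % 10))
            + ∑ k ∈ Finset.range (m + 1), dsN (k / (P * 10)) := by
        rw [← Finset.sum_add_distrib]
        refine Finset.sum_congr rfl fun k _ => ?_
        rw [dsN_eq (k / P), Nat.div_div_eq_div_mul]
      rw [hsplit, step_sum P m (by omega), Nat.mul_comm 10 P]
      push_cast
      ring
    · rw [altLoop, dif_neg (by omega)]
      have hz : ∑ k ∈ Finset.range (m + 1), dsN (k / P) = 0 :=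
        Finset.sum_eq_zero fun k hk => by
          rw [Nat.div_eq_of_lt (by have := Finset.mem_range.mp hk; omega), dsN_zero]
      rw [hz]; simp

theorem altLoop_eq (m P : Nat) (t : Int) (hP : 1 ≤ P) :
    altLoop (m : Int) (P : Int) t = t + ((∑ k ∈ Finset.range (m + 1), dsN (k / P) : Nat) : Int) :=
  altLoop_eq_aux (m + 1) m P t hP (by omega)

theorem fB_eq (m : Nat) : f_alt (m : Int) = (GN (m + 1) : Int) := by
  rw [f_alt, if_neg (by omega)]
  have h := altLoop_eq m 1 0 le_rfl
  simp only [Nat.cast_one, Nat.div_one, zero_add] at h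
  rw [h, GN]

theorem sum_map_mul_cast (X : Nat) (B : Int) (g : Nat → Int) (hg : ∀ k, g k = B * (k : Int)) :
    ((List.range X).map g).sum = B * ((∑ i ∈ Finset.range X, i : Nat) : Int) := by
  induction X with
  | zero => simp
  | succ X ih =>
    rw [List.range_succ, List.map_append, List.sum_append, ih, Finset.sum_range_succ]
    simp [hg]
    ring

theorem fA_eq (m : Nat) : f (m : Int) = (GN (m + 1) : Int) := by
  induction m using Nat.strong_induction_on with
  | _ m ih =>
    by_cases h10 : m < 10
    · rw [f, if_neg (by omega), if_pos (by omega)]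
      have hds : ∀ k, k < 10 → dsN k = k := fun k hk => by
        rw [dsN_eq, Nat.mod_eq_of_lt hk, Nat.div_eq_of_lt hk, dsN_zero]
        omega
      have hG : GN (m + 1) = ∑ k ∈ Finset.range (m + 1), k :=
        Finset.sum_congr rfl fun k hk => hds k (by have := Finset.mem_range.mp hk; omega)
      have h2 : m * (m + 1) = GN (m + 1) * 2 := by
        rw [hG, Nat.mul_comm]; exact (Finset.sum_range_id_mul_two (m + 1)).symm
      have hc : ((m : Int)) * ((m : Int) + 1) = ((GN (m + 1) : Nat) : Int) * 2 := by
        exact_mod_cast congrArg (Nat.cast : Nat → Int) h2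
      rw [Int.shiftRight_eq_div_pow, hc]
      norm_num
    · obtain ⟨h1, h2, h3, h4, h5, h6⟩ := leadA_spec (m : Int) (by omega)
      rw [f, if_neg (by omega), if_neg (by omega)]
      dsimp only
      set D := (leadA (m : Int)).2.toNat with hD
      set X := m / 10 ^ D with hX
      set Q := m % 10 ^ D with hQ
      have hpow : ((10 : Int)) ^ D = ((10 ^ D : Nat) : Int) := by push_cast; ring
      have hpos : 0 < 10 ^ D := by positivity
      have hBm : (10 : Nat) ^ D ≤ m := by
        rw [hpow] at h4; exact_mod_cast h4
      have hxX : (leadA (m : Int)).1 = ((X : Nat) : Int) := by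
        rw [h6, hpow, hX]; exact (Int.natCast_div m (10 ^ D)).symm
      have hX1 : 1 ≤ X := by rw [hxX] at h1; exact_mod_cast h1
      have hX9 : X ≤ 9 := by rw [hxX] at h2; exact_mod_cast h2
      have hQlt : Q < 10 ^ D := Nat.mod_lt _ hpos
      have hmQX : m = X * 10 ^ D + Q := by
        rw [hX, hQ, Nat.mul_comm]; exact (Nat.div_add_mod m (10 ^ D)).symm
      rw [hxX]
      have hs : (PySem.List.pyRange 0 ((X : Nat) : Int) 1).foldl
            (fun s i => s + (10 : Int) ^ D * i) 0
          = ((10 ^ D * ∑ i ∈ Finset.range X, i : Nat) : Int) := by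
        rw [PySem.List.foldl_add _ (fun i => (10 : Int) ^ D * i) 0, PySem.List.pyRange_one,
          List.map_map, show (((X : Nat) : Int) - 0).toNat = X by omega,
          sum_map_mul_cast X ((10 : Int) ^ D) _ (fun k => by simp)]
        push_cast
        ring
      have hp1 : f ((10 : Int) ^ D - 1) = ((GN (10 ^ D) : Nat) : Int) := by
        have e : ((10 : Int) ^ D - 1) = ((10 ^ D - 1 : Nat) : Int) := by
          rw [hpow, ← Nat.cast_one (R := Int), ← Nat.cast_sub (by omega)]
        rw [e, ih (10 ^ D - 1) (by omega), show 10 ^ D - 1 + 1 = 10 ^ D by omega]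
      have hq1 : (m : Int) - (10 : Int) ^ D * ((X : Nat) : Int) = ((Q : Nat) : Int) := by
        calc (m : Int) - (10 : Int) ^ D * ((X : Nat) : Int)
            = (m : Int) - ((X * 10 ^ D : Nat) : Int) := by push_cast; ring
          _ = ((m - X * 10 ^ D : Nat) : Int) := by rw [Nat.cast_sub (by omega)]
          _ = ((Q : Nat) : Int) := by rw [show m - X * 10 ^ D = Q by omega]
      rw [hs, hq1, hp1, ih Q (by omega)]
      rw [show m + 1 = X * 10 ^ D + (Q + 1) by omega,
        GN_block D X (Q + 1) hX9 (by omega)]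
      push_cast
      ring

-- ===== VERDICT (by name: the statement is the Claim_ definition above) =====
theorem f_spec : Claim_equal_f := by
  intro n _
  unfold Spec_f
  by_cases hn : n < 0
  · rw [f, f_alt, if_pos hn, if_pos hn]
  · have : n = ((n.toNat : Nat) : Int) := by omega
    rw [this, fA_eq, fB_eq]
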